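-- pv_equiv track=rewrite | github.com/maruyamakoju/sopilot | scripts/train_task_adapter.py | build_labels_from_step_boundaries
-- ===== SOURCE A (Python) =====
-- def build_labels_from_step_boundaries(
--     step_boundaries: list[int],
--     n_clips: int,
-- ) -> list[int | None]:
--     """
--     Map each clip to a step index using step_boundaries (clip-index boundary points).
--
--     Boundary semantics: boundary B means clips [0..B-1] belong to step i,
--     clips [B..next_B-1] belong to step i+1.  This matches the convention
--     used in sopilot.core.scoring._build_step_spans.
--     """
--     boundaries = sorted(b for b in step_boundaries if 0 < b < n_clips)
--     clip_labels: list[int | None] = []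
--     for clip_idx in range(n_clips):
--         step = 0
--         for b in boundaries:
--             if clip_idx >= b:
--                 step += 1
--             else:
--                 break
--         clip_labels.append(step)
--     return clip_labels
-- ===== SOURCE B (Python) =====
-- def build_labels_from_step_boundaries(
--     step_boundaries: list[int],
--     n_clips: int,
-- ) -> list[int | None]:
--     # Single incremental pass: a pointer j walks the sorted boundaries once,
--     # so each clip's step index is just j (boundaries consumed so far).
--     boundaries = sorted(b for b in step_boundaries if 0 < b < n_clips)
--     m = len(boundaries)
--     labels: list[int | None] = []
--     j = 0
--     for clip_idx in range(n_clips):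
--         while j < m and boundaries[j] <= clip_idx:
--             j += 1
--         labels.append(j)
--     return labels
-- ===== Notes on version B (the rewrite author's own statement) =====
-- stated objective: faster
-- what changed: Replaces the per-clip rescan of all boundaries with a single incremental pointer over the sorted boundary list, so each boundary is consumed exactly once.
import Mathlib
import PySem

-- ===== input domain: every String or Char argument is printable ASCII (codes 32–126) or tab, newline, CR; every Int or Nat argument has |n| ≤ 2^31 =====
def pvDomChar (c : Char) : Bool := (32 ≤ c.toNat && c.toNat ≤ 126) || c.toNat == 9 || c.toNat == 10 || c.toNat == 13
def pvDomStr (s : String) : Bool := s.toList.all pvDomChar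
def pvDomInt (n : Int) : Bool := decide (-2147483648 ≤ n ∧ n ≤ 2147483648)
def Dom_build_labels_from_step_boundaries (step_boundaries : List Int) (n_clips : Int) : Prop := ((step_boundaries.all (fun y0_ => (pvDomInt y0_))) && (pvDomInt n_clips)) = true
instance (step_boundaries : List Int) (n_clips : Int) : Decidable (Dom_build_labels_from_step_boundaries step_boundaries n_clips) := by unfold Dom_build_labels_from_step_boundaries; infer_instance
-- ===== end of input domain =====

-- B replaces A's per-clip rescan of all boundaries by a single incremental pointer
-- over the sorted boundary list (objective: faster).

-- ===== PORT A =====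
-- inner 'for b in boundaries: if clip_idx >= b: step += 1 else: break'
def pvInnerA (clip_idx : Int) : List Int → Int
  | [] => 0
  | b :: rest => if clip_idx ≥ b then 1 + pvInnerA clip_idx rest else 0

def build_labels_from_step_boundaries (step_boundaries : List Int) (n_clips : Int) : List (Option Int) :=
  let boundaries := PySem.List.sorted (step_boundaries.filter (fun b => decide (0 < b) && decide (b < n_clips))) id false
  (PySem.List.pyRange 0 n_clips 1).foldl
    (fun acc clip_idx => acc ++ [some (pvInnerA clip_idx boundaries)]) []

-- ===== PORT B =====
-- 'while j < m and boundaries[j] <= clip_idx: j += 1' — rem is boundaries[j:], j the pointer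
def pvAdvance (clip_idx : Int) : List Int → Int → (List Int × Int)
  | [], j => ([], j)
  | b :: rest, j => if b ≤ clip_idx then pvAdvance clip_idx rest (j + 1) else (b :: rest, j)

-- 'for clip_idx in range(n_clips)', counted down by the number of clips left
def pvLoopB (rem : List Int) (j clip_idx : Int) : Nat → List (Option Int)
  | 0 => []
  | Nat.succ k =>
    let s := pvAdvance clip_idx rem j
    some s.2 :: pvLoopB s.1 s.2 (clip_idx + 1) k

def build_labels_from_step_boundaries_alt (step_boundaries : List Int) (n_clips : Int) : List (Option Int) :=
  let boundaries := PySem.List.sorted (step_boundaries.filter (fun b => decide (0 < b) && decide (b < n_clips))) id false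
  pvLoopB boundaries 0 0 n_clips.toNat

-- ===== PRECONDITION & SPEC =====
def Spec_build_labels_from_step_boundaries (step_boundaries : List Int) (n_clips : Int) (out : List (Option Int)) : Prop := out = build_labels_from_step_boundaries_alt step_boundaries n_clips
instance (step_boundaries : List Int) (n_clips : Int) (out : List (Option Int)) : Decidable (Spec_build_labels_from_step_boundaries step_boundaries n_clips out) := by unfold Spec_build_labels_from_step_boundaries; infer_instance

-- ===== CLAIM (what is proved, stated in full; the proofs are below) =====
def Claim_equal_build_labels_from_step_boundaries : Prop := ∀ (step_boundaries : List Int) (n_clips : Int), Dom_build_labels_from_step_boundaries step_boundaries n_clips → Spec_build_labels_from_step_boundaries step_boundaries n_clips (build_labels_from_step_boundaries step_boundaries n_clips)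

-- ===== LEMMAS AND PROOFS =====

-- A's inner break-loop is exactly a takeWhile length
theorem pvInnerA_eq_takeWhile (i : Int) (l : List Int) :
    pvInnerA i l = ((l.takeWhile (fun b => decide (b ≤ i))).length : Int) := by
  induction l with
  | nil => simp [pvInnerA]
  | cons b rest ih =>
    by_cases h : b ≤ i
    · simp [pvInnerA, List.takeWhile, ge_iff_le, h, ih]; omega
    · simp [pvInnerA, List.takeWhile, ge_iff_le, h]

theorem pvAdvance_eq (i : Int) (l : List Int) (j : Int) :
    pvAdvance i l j = (l.dropWhile (fun b => decide (b ≤ i)),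
                       j + ((l.takeWhile (fun b => decide (b ≤ i))).length : Int)) := by
  induction l generalizing j with
  | nil => simp [pvAdvance]
  | cons b rest ih =>
    by_cases h : b ≤ i
    · simp [pvAdvance, List.dropWhile, List.takeWhile, h, ih]; omega
    · simp [pvAdvance, List.dropWhile, List.takeWhile, h]

theorem takeWhile_split {p q : Int → Bool} (hpq : ∀ x, q x = true → p x = true)
    (l : List Int) :
    l.takeWhile p = l.takeWhile q ++ (l.dropWhile q).takeWhile p := by
  induction l with
  | nil => simp
  | cons b rest ih =>
    by_cases h : q b = true
    · simp [List.takeWhile, List.dropWhile, h, hpq b h, ih]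
    · simp [List.takeWhile, List.dropWhile, h]

theorem pvLoopB_spec (n : Nat) : ∀ (rem : List Int) (j i : Int),
    pvLoopB rem j i n =
      (List.range n).map (fun (k : Nat) =>
        some (j + ((rem.takeWhile (fun b => decide (b ≤ i + (k : Int)))).length : Int))) := by
  induction n with
  | zero => intro rem j i; simp [pvLoopB]
  | succ m ih =>
    intro rem j i
    rw [List.range_succ_eq_map, List.map_cons, List.map_map]
    simp only [pvLoopB, pvAdvance_eq]
    congr 1
    · simp
    rw [ih]
    apply List.map_congr_left
    intro k _
    simp only [Function.comp]
    congr 1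
    have hsplit := takeWhile_split
      (p := fun b => decide (b ≤ i + ((k : Int) + 1)))
      (q := fun b => decide (b ≤ i))
      (by intro x hx; simp at hx ⊢; omega) rem
    have heq : i + 1 + (k : Int) = i + ((k : Int) + 1) := by ring
    have hcast : ((Nat.succ k : Nat) : Int) = (k : Int) + 1 := by push_cast; ring
    rw [hcast, heq, hsplit, List.length_append]
    push_cast
    ring

theorem foldl_append_map {α β : Type} (l : List α) (f : α → β) (init : List β) :
    l.foldl (fun acc x => acc ++ [f x]) init = init ++ l.map f := by
  induction l generalizing init with
  | nil => simp
  | cons x rest ih => simp [List.foldl, ih]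

-- ===== VERDICT (by name: the statement is the Claim_ definition above) =====
theorem build_labels_from_step_boundaries_spec : Claim_equal_build_labels_from_step_boundaries := by
  intro sb n _
  unfold Spec_build_labels_from_step_boundaries
  unfold build_labels_from_step_boundaries build_labels_from_step_boundaries_alt
  simp only [foldl_append_map, List.nil_append, PySem.List.pyRange_one, pvLoopB_spec,
    List.map_map, Int.sub_zero]
  apply List.map_congr_left
  intro k _
  simp [Function.comp, pvInnerA_eq_takeWhile]
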